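-- pv_equiv track=rewrite | github.com/viktorhollanders/python | week8/tokenization.py | count
-- ===== SOURCE A (Python) =====
-- def count(a_list: list):
--     word_count = 0
--     token_count = 0
--     symbols = ".,!?"
--
--     for word in a_list:
--         word_count += 1
--         for token in word:
--             if token in symbols:
--                 token_count += 1
--
--     return (word_count, token_count)
-- ===== SOURCE B (Python) =====
-- def count(a_list: list):
--     counts = {}
--     for word in a_list:
--         for ch in word:
--             counts[ch] = counts.get(ch, 0) + 1
--     return (len(a_list), sum(counts.get(s, 0) for s in ".,!?"))
-- ===== Notes on version B (the rewrite author's own statement) =====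
-- stated objective: alternative
-- what changed: B builds a character frequency table over all words in one tally pass and then computes the punctuation count by looking up only the four symbols in the table, instead of A's per-character membership test against the symbol string.
import Mathlib
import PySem

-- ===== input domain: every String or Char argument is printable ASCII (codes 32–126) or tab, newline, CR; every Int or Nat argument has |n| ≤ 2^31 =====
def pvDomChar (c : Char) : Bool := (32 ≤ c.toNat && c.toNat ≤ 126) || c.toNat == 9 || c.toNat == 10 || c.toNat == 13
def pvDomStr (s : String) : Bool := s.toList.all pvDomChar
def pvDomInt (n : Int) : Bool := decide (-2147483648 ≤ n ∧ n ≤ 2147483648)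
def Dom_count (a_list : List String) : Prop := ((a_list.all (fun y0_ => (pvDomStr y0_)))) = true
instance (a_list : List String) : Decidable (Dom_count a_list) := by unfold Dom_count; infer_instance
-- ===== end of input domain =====

-- B replaces A's per-character membership test with a character frequency table built once,
-- then a lookup of the four punctuation symbols (alternative decomposition, same cost).

-- ===== PORT A =====
-- A: two counters, nested loops, membership test of each char in ".,!?"
def count (a_list : List String) : Int × Int :=
  let symbols : List Char := ['.', ',', '!', '?']
  a_list.foldl (fun (st : Int × Int) word =>
    let word_count := st.1 + 1
    let token_count := word.toList.foldl
      (fun tc token => if token ∈ symbols then tc + 1 else tc) st.2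
    (word_count, token_count)) (0, 0)

-- ===== PORT B =====
-- B: build counts[ch] = counts.get(ch,0)+1 over all words, then sum the four symbol counts
def count_alt (a_list : List String) : Int × Int :=
  let counts : PySem.Dict Char Int :=
    a_list.foldl (fun d word =>
      word.toList.foldl (fun d ch => d.modify ch 0 (· + 1)) d) PySem.Dict.empty
  ((a_list.length : Int), (['.', ',', '!', '?'].map (fun s => counts.getD s 0)).sum)

-- ===== PRECONDITION & SPEC =====
def Spec_count (a_list : List String) (out : Int × Int) : Prop := out = count_alt a_list
instance (a_list : List String) (out : Int × Int) : Decidable (Spec_count a_list out) := by unfold Spec_count; infer_instance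

-- ===== CLAIM (what is proved, stated in full; the proofs are below) =====
def Claim_equal_count : Prop := ∀ (a_list : List String), Dom_count a_list → Spec_count a_list (count a_list)

-- ===== LEMMAS AND PROOFS =====

-- A's loop, closed form with a generalized initial state
theorem count_loop_closed (a_list : List String) (w t : Int) :
    a_list.foldl (fun (st : Int × Int) word =>
      (st.1 + 1, word.toList.foldl
        (fun tc token => if token ∈ (['.', ',', '!', '?'] : List Char) then tc + 1 else tc) st.2))
      (w, t)
    = (w + a_list.length,
       t + ((a_list.flatMap String.toList).countP
              (fun c => c ∈ (['.', ',', '!', '?'] : List Char)) : Int)) := by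
  induction a_list generalizing w t with
  | nil => simp
  | cons x xs ih =>
    simp only [List.foldl_cons, List.flatMap_cons, List.countP_append]
    rw [ih, PySem.List.foldl_ite_add_one]
    simp only [Prod.mk.injEq, List.length_cons]
    constructor
    · push_cast; ring
    · push_cast; ring

-- B's counter loop, closed form with a generalized dict
theorem counts_closed (a_list : List String) (d : PySem.Dict Char Int) (c : Char) :
    (a_list.foldl (fun d word =>
        word.toList.foldl (fun d ch => d.modify ch 0 (· + 1)) d) d).getD c 0
    = d.getD c 0 + ((a_list.flatMap String.toList).count c : Int) := by
  induction a_list generalizing d with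
  | nil => simp
  | cons x xs ih =>
    simp only [List.foldl_cons, List.flatMap_cons, List.count_append]
    rw [ih, PySem.Dict.getD_foldl_modify_add_one]
    push_cast; ring

-- countP over the four distinct symbols is the sum of the four individual counts
theorem countP_four (l : List Char) :
    l.countP (fun c => c ∈ (['.', ',', '!', '?'] : List Char))
    = l.count '.' + l.count ',' + l.count '!' + l.count '?' := by
  induction l with
  | nil => rfl
  | cons c l ih =>
    simp only [List.countP_cons, List.count_cons, ih]
    by_cases h1 : c = '.' <;> by_cases h2 : c = ',' <;> by_cases h3 : c = '!' <;>
      by_cases h4 : c = '?' <;> simp_all <;> omega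

-- ===== VERDICT (by name: the statement is the Claim_ definition above) =====
theorem count_spec : Claim_equal_count := by
  intro a_list _
  unfold Spec_count count count_alt
  simp only []
  rw [count_loop_closed]
  have hc := fun c => counts_closed a_list PySem.Dict.empty c
  simp only [List.map, List.sum_cons, List.sum_nil]
  rw [hc '.', hc ',', hc '!', hc '?']
  simp only [PySem.Dict.getD_empty]
  rw [countP_four (a_list.flatMap String.toList)]
  simp only [Prod.mk.injEq]
  constructor
  · ring
  · push_cast; ring
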